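-- pv_equiv track=rewrite | github.com/Angleito/Single-Agent-Trader | security/falco/security_event_processor.py | _containers_related
-- ===== SOURCE A (Python) =====
-- def _containers_related(container1: str, container2: str) -> bool:
--     """Check if two containers are related"""
--     related_groups = [
--         ['ai-trading-bot', 'bluefin-service'],
--         ['dashboard-backend', 'dashboard-frontend'],
--         ['mcp-memory', 'mcp-omnisearch']
--     ]
--
--     for group in related_groups:
--         if container1 in group and container2 in group:
--             return True
--
--     return False
-- ===== SOURCE B (Python) =====
-- _GROUP_INDEX = {
--     'ai-trading-bot': 0,
--     'bluefin-service': 0,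
--     'dashboard-backend': 1,
--     'dashboard-frontend': 1,
--     'mcp-memory': 2,
--     'mcp-omnisearch': 2,
-- }
--
--
-- def _containers_related(container1: str, container2: str) -> bool:
--     """Check if two containers are related"""
--     g1 = _GROUP_INDEX.get(container1)
--     if g1 is None:
--         return False
--     g2 = _GROUP_INDEX.get(container2)
--     return g2 is not None and g1 == g2
-- ===== Notes on version B (the rewrite author's own statement) =====
-- stated objective: idiomatic
-- what changed: Replaced the per-call loop over groups with a precomputed name-to-group-index dict and two direct lookups.
import Mathlib
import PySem

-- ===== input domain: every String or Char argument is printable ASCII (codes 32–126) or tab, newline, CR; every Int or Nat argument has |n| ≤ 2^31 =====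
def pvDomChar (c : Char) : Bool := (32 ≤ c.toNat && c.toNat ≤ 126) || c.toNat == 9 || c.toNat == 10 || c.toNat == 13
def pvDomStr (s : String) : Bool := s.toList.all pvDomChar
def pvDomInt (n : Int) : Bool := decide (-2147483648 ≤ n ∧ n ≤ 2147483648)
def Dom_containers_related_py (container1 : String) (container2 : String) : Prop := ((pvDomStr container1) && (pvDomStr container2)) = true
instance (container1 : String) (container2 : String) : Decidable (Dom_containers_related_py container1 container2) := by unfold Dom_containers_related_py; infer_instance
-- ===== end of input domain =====

-- B replaces A's per-call scan over the group lists by a precomputed name→group-index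
-- dict and two direct lookups (idiomatic table lookup; same results, no speed claim).

-- ===== PORT A =====
-- the literal list of related groups from A
def pvGroupsA : List (List String) :=
  [["ai-trading-bot", "bluefin-service"],
   ["dashboard-backend", "dashboard-frontend"],
   ["mcp-memory", "mcp-omnisearch"]]

-- A's for-loop with early return True
def pvLoopA (c1 c2 : String) : List (List String) → Bool
  | [] => false
  | g :: rest => if g.contains c1 && g.contains c2 then true else pvLoopA c1 c2 rest

def containers_related_py (container1 : String) (container2 : String) : Bool :=
  pvLoopA container1 container2 pvGroupsA

-- ===== PORT B =====
-- B's module-level _GROUP_INDEX dict literal (built key by key, as Python builds it)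
def pvGroupIndex : PySem.Dict String Int :=
  ((((((PySem.Dict.empty.insert "ai-trading-bot" 0).insert "bluefin-service" 0).insert
      "dashboard-backend" 1).insert "dashboard-frontend" 1).insert
      "mcp-memory" 2).insert "mcp-omnisearch" 2)

def containers_related_py_alt (container1 : String) (container2 : String) : Bool :=
  match PySem.Dict.get? pvGroupIndex container1 with
  | none => false
  | some g1 =>
    match PySem.Dict.get? pvGroupIndex container2 with
    | none => false
    | some g2 => g1 == g2

-- ===== PRECONDITION & SPEC =====
def Spec_containers_related_py (container1 : String) (container2 : String) (out : Bool) : Prop := out = containers_related_py_alt container1 container2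
instance (container1 : String) (container2 : String) (out : Bool) : Decidable (Spec_containers_related_py container1 container2 out) := by unfold Spec_containers_related_py; infer_instance

-- ===== CLAIM (what is proved, stated in full; the proofs are below) =====
def Claim_equal_containers_related_py : Prop := ∀ (container1 : String) (container2 : String), Dom_containers_related_py container1 container2 → Spec_containers_related_py container1 container2 (containers_related_py container1 container2)

-- ===== LEMMAS AND PROOFS =====

-- proof-side normal form: the group index of a name as an if-chain
def pvIdx (c : String) : Option Int :=
  if c = "ai-trading-bot" then some 0
  else if c = "bluefin-service" then some 0
  else if c = "dashboard-backend" then some 1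
  else if c = "dashboard-frontend" then some 1
  else if c = "mcp-memory" then some 2
  else if c = "mcp-omnisearch" then some 2
  else none

theorem pvLookup_eq (c : String) : PySem.Dict.get? pvGroupIndex c = pvIdx c := by
  simp only [pvGroupIndex, pvIdx, PySem.Dict.get?_insert, PySem.Dict.get?_empty]
  split_ifs <;> simp_all

theorem pvMem0 (c : String) :
    (["ai-trading-bot", "bluefin-service"] : List String).contains c = (pvIdx c == some 0) := by
  unfold pvIdx; split_ifs <;> subst_vars <;> simp_all

theorem pvMem1 (c : String) :
    (["dashboard-backend", "dashboard-frontend"] : List String).contains c = (pvIdx c == some 1) := by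
  unfold pvIdx; split_ifs <;> subst_vars <;> simp_all

theorem pvMem2 (c : String) :
    (["mcp-memory", "mcp-omnisearch"] : List String).contains c = (pvIdx c == some 2) := by
  unfold pvIdx; split_ifs <;> subst_vars <;> simp_all

theorem pvIdx_cases (c : String) :
    pvIdx c = none ∨ pvIdx c = some 0 ∨ pvIdx c = some 1 ∨ pvIdx c = some 2 := by
  unfold pvIdx; split_ifs <;> simp

-- ===== VERDICT (by name: the statement is the Claim_ definition above) =====
theorem containers_related_py_spec : Claim_equal_containers_related_py := by
  intro c1 c2 _
  unfold Spec_containers_related_py containers_related_py containers_related_py_alt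
  simp only [pvGroupsA, pvLoopA, pvMem0, pvMem1, pvMem2, pvLookup_eq]
  rcases pvIdx_cases c1 with h1 | h1 | h1 | h1 <;>
  rcases pvIdx_cases c2 with h2 | h2 | h2 | h2 <;>
  simp [h1, h2]
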